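-- pv_equiv track=rewrite | github.com/ducktyper/advant_of_code | day13_part2.py | smuge_equal
-- ===== SOURCE A (Python) =====
-- def smuge_equal(a, b):
--     if a == b:
--         return False
--     aa = bin(abs(a))[2:]
--     bb = bin(abs(b))[2:]
--     if len(aa) > len(bb):
--         bb = "0" * (len(aa) - len(bb)) + bb
--     else:
--         aa = "0" * (len(bb) - len(aa)) + aa
--     diff_count = 0
--     for i in range(len(aa)):
--         if aa[i] != bb[i]:
--             diff_count += 1
--     return diff_count == 1
-- ===== SOURCE B (Python) =====
-- def smuge_equal(a, b):
--     return (abs(a) ^ abs(b)).bit_count() == 1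
-- ===== Notes on version B (the rewrite author's own statement) =====
-- stated objective: idiomatic
-- what changed: Replaces the binary-string construction, zero-padding and per-character comparison loop with a pure integer closed form: XOR the magnitudes and test popcount == 1 (the a==b guard is dropped as redundant, since equal magnitudes give XOR 0).
import Mathlib
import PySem

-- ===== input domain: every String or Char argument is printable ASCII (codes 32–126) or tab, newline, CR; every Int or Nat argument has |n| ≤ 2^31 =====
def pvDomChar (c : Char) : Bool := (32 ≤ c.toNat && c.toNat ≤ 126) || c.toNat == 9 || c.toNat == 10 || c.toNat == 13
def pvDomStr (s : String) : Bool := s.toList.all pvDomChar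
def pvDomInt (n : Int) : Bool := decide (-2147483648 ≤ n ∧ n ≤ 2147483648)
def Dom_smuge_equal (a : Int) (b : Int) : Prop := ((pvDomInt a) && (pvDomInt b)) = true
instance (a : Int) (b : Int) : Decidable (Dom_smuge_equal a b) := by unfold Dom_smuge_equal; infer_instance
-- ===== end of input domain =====

-- B replaces A's binary-string building, zero-padding and character-comparison loop by the
-- integer closed form popcount(|a| xor |b|) == 1 (the redundant a==b guard is dropped).

-- ===== PORT A =====
-- bitChar r : the binary digit character Python's bin produces for the remainder r
def bitChar (r : Nat) : Char := if r = 1 then '1' else '0'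

-- binCore n = the characters of bin(n)[2:] for n > 0 (MSB first; empty for 0)
def binCore : Nat → List Char
  | 0 => []
  | n + 1 => binCore ((n + 1) / 2) ++ [bitChar ((n + 1) % 2)]
decreasing_by exact Nat.div_lt_self (Nat.succ_pos n) one_lt_two

-- pyBin n = bin(n)[2:] as a character list (Python: bin(0)[2:] = "0")
def pyBin (n : Nat) : List Char := if n = 0 then ['0'] else binCore n

-- Python's if/else that left-pads the shorter string with '0's (aa, bb reassignment)
def padPair (aa bb : List Char) : List Char × List Char :=
  if aa.length > bb.length then (aa, List.replicate (aa.length - bb.length) '0' ++ bb)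
  else (List.replicate (bb.length - aa.length) '0' ++ aa, bb)

def smuge_equal (a : Int) (b : Int) : Bool :=
  if a = b then false
  else
    let aa := pyBin a.natAbs
    let bb := pyBin b.natAbs
    let p := padPair aa bb
    -- for i in range(len(aa)): if aa[i] != bb[i]: diff_count += 1   (indices are in range,
    -- so aa[i] is ported exactly by getD)
    let diff := (List.range p.1.length).foldl
      (fun d i => if p.1.getD i ' ' ≠ p.2.getD i ' ' then d + 1 else d) 0
    decide (diff = 1)

-- ===== PORT B =====
-- int.bit_count, ported by hand (exact for all Nat)
def popCount : Nat → Nat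
  | 0 => 0
  | n + 1 => (n + 1) % 2 + popCount ((n + 1) / 2)
decreasing_by exact Nat.div_lt_self (Nat.succ_pos n) one_lt_two

def smuge_equal_alt (a : Int) (b : Int) : Bool :=
  decide (popCount (a.natAbs ^^^ b.natAbs) = 1)

-- ===== PRECONDITION & SPEC =====
def Spec_smuge_equal (a : Int) (b : Int) (out : Bool) : Prop := out = smuge_equal_alt a b
instance (a : Int) (b : Int) (out : Bool) : Decidable (Spec_smuge_equal a b out) := by unfold Spec_smuge_equal; infer_instance

-- ===== CLAIM (what is proved, stated in full; the proofs are below) =====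
def Claim_equal_smuge_equal : Prop := ∀ (a : Int) (b : Int), Dom_smuge_equal a b → Spec_smuge_equal a b (smuge_equal a b)

-- ===== LEMMAS AND PROOFS =====

-- LSB-first binary digits (empty for 0); binCore is its reverse
def lsb : Nat → List Char
  | 0 => []
  | n + 1 => bitChar ((n + 1) % 2) :: lsb ((n + 1) / 2)
decreasing_by exact Nat.div_lt_self (Nat.succ_pos n) one_lt_two

-- count of differing positions of two LSB-first digit lists, the shorter implicitly padded with '0'
def cmpL : List Char → List Char → Nat
  | [], [] => 0
  | [], d :: ds => (if '0' ≠ d then 1 else 0) + cmpL [] ds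
  | c :: cs, [] => (if c ≠ '0' then 1 else 0) + cmpL cs []
  | c :: cs, d :: ds => (if c ≠ d then 1 else 0) + cmpL cs ds

theorem lsb_zero : lsb 0 = [] := by simp [lsb]

theorem lsb_pos (n : Nat) (h : n ≠ 0) : lsb n = bitChar (n % 2) :: lsb (n / 2) := by
  cases n with
  | zero => exact absurd rfl h
  | succ k => simp [lsb]

theorem popCount_zero : popCount 0 = 0 := by simp [popCount]

theorem popCount_unfold (x : Nat) : popCount x = x % 2 + popCount (x / 2) := by
  cases x with
  | zero => simp [popCount_zero]
  | succ k => simp [popCount]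

theorem binCore_eq (n : Nat) : binCore n = (lsb n).reverse := by
  induction n using Nat.strong_induction_on with
  | _ n ih =>
    cases n with
    | zero => simp [binCore, lsb]
    | succ k =>
      have hd : (k + 1) / 2 < k + 1 := Nat.div_lt_self (Nat.succ_pos k) one_lt_two
      rw [binCore, lsb, List.reverse_cons, ih _ hd]

theorem bitChar_diff (x y : Nat) (hx : x < 2) (hy : y < 2) :
    (if bitChar x ≠ bitChar y then (1 : Nat) else 0) = (x + y) % 2 := by
  interval_cases x <;> interval_cases y <;> simp [bitChar]

theorem zeroChar_diff (y : Nat) (hy : y < 2) :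
    (if ('0' : Char) ≠ bitChar y then (1 : Nat) else 0) = y := by
  interval_cases y <;> simp [bitChar]

theorem diff_zeroChar (x : Nat) (hx : x < 2) :
    (if bitChar x ≠ ('0' : Char) then (1 : Nat) else 0) = x := by
  interval_cases x <;> simp [bitChar]

theorem cmpL_lsb (m n : Nat) : cmpL (lsb m) (lsb n) = popCount (m ^^^ n) := by
  by_cases hm : m = 0 <;> by_cases hn : n = 0
  · subst hm; subst hn
    simp [lsb_zero, cmpL, Nat.xor_self, popCount_zero]
  · subst hm
    have ih : cmpL (lsb 0) (lsb (n / 2)) = popCount (0 ^^^ (n / 2)) := cmpL_lsb 0 (n / 2)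
    rw [lsb_zero] at ih ⊢
    rw [lsb_pos n hn, cmpL, ih, Nat.zero_xor, Nat.zero_xor,
      zeroChar_diff (n % 2) (Nat.mod_lt n two_pos), popCount_unfold n]
  · subst hn
    have ih : cmpL (lsb (m / 2)) (lsb 0) = popCount ((m / 2) ^^^ 0) := cmpL_lsb (m / 2) 0
    rw [lsb_zero] at ih ⊢
    rw [lsb_pos m hm, cmpL, ih, Nat.xor_zero, Nat.xor_zero,
      diff_zeroChar (m % 2) (Nat.mod_lt m two_pos), popCount_unfold m]
  · have ih : cmpL (lsb (m / 2)) (lsb (n / 2)) = popCount ((m / 2) ^^^ (n / 2)) :=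
      cmpL_lsb (m / 2) (n / 2)
    rw [lsb_pos m hm, lsb_pos n hn, cmpL, ih,
      bitChar_diff (m % 2) (n % 2) (Nat.mod_lt m two_pos) (Nat.mod_lt n two_pos),
      popCount_unfold (m ^^^ n), Nat.xor_div_two, Nat.xor_mod_two_eq]
    congr 1
    omega
termination_by m + n
decreasing_by
  · have : n / 2 < n := Nat.div_lt_self (Nat.pos_of_ne_zero hn) one_lt_two; omega
  · have : m / 2 < m := Nat.div_lt_self (Nat.pos_of_ne_zero hm) one_lt_two; omega
  · have h1 : m / 2 < m := Nat.div_lt_self (Nat.pos_of_ne_zero hm) one_lt_two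
    have h2 : n / 2 < n := Nat.div_lt_self (Nat.pos_of_ne_zero hn) one_lt_two
    omega

theorem cmpL_repl (k : Nat) (ys : List Char) :
    cmpL (List.replicate k '0') ys = cmpL [] ys := by
  induction k generalizing ys with
  | zero => rfl
  | succ k ih =>
    cases ys with
    | nil => simp [List.replicate_succ, cmpL, ih]
    | cons d ds => simp [List.replicate_succ, cmpL, ih]

theorem cmpL_pad_left (xs : List Char) (k : Nat) (ys : List Char) :
    cmpL (xs ++ List.replicate k '0') ys = cmpL xs ys := by
  induction xs generalizing ys with
  | nil => simpa using cmpL_repl k ys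
  | cons c cs ih =>
    cases ys with
    | nil => simp [cmpL, ih]
    | cons d ds => simp [cmpL, ih]

theorem cmpL_repl_right (k : Nat) (xs : List Char) :
    cmpL xs (List.replicate k '0') = cmpL xs [] := by
  induction k generalizing xs with
  | zero => rfl
  | succ k ih =>
    cases xs with
    | nil => simp [List.replicate_succ, cmpL, ih]
    | cons c cs => simp [List.replicate_succ, cmpL, ih]

theorem cmpL_pad_right (ys : List Char) (k : Nat) (xs : List Char) :
    cmpL xs (ys ++ List.replicate k '0') = cmpL xs ys := by
  induction ys generalizing xs with
  | nil => simpa using cmpL_repl_right k xs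
  | cons d ds ih =>
    cases xs with
    | nil => simp [cmpL, ih]
    | cons c cs => simp [cmpL, ih]

theorem pyBin_zero : pyBin 0 = ['0'] := by simp [pyBin]

theorem pyBin_reverse (n : Nat) (h : n ≠ 0) : (pyBin n).reverse = lsb n := by
  rw [pyBin, if_neg h, binCore_eq, List.reverse_reverse]

theorem cmpL_pyBin (m n : Nat) :
    cmpL (pyBin m).reverse (pyBin n).reverse = popCount (m ^^^ n) := by
  have hL : ∀ ys, cmpL ['0'] ys = cmpL [] ys := fun ys => by
    simpa using cmpL_pad_left [] 1 ys
  have hR : ∀ xs, cmpL xs ['0'] = cmpL xs [] := fun xs => by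
    simpa using cmpL_pad_right [] 1 xs
  by_cases hm : m = 0 <;> by_cases hn : n = 0
  · subst hm; subst hn
    simp [pyBin_zero, hL, hR, cmpL, Nat.xor_self, popCount_zero]
  · subst hm
    rw [pyBin_zero, pyBin_reverse n hn]
    show cmpL ['0'] (lsb n) = _
    rw [hL, ← lsb_zero, cmpL_lsb]
  · subst hn
    rw [pyBin_zero, pyBin_reverse m hm]
    show cmpL (lsb m) ['0'] = _
    rw [hR, ← lsb_zero, cmpL_lsb]
  · rw [pyBin_reverse m hm, pyBin_reverse n hn, cmpL_lsb]

theorem loop_eq (xs ys : List Char) (h : xs.length = ys.length) :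
    (List.range xs.length).foldl
      (fun d i => if xs.getD i ' ' ≠ ys.getD i ' ' then d + 1 else d) 0
    = cmpL xs.reverse ys.reverse := by
  induction xs using List.reverseRecOn generalizing ys with
  | nil =>
    cases ys with
    | nil => simp [cmpL]
    | cons d ds => simp at h
  | append_singleton zs c ih =>
    rcases List.eq_nil_or_concat ys with rfl | ⟨ws, d, rfl⟩
    · simp at h
    · simp only [List.concat_eq_append] at h ⊢
      have hlen : zs.length = ws.length := by
        simp [List.length_append] at h; omega
      have hbig : (zs ++ [c]).length = zs.length + 1 := by simp
      rw [hbig, List.range_succ, List.foldl_append]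
      have hcong :
          (List.range zs.length).foldl
            (fun d' i => if (zs ++ [c]).getD i ' ' ≠ (ws ++ [d]).getD i ' ' then d' + 1 else d') 0
          = (List.range zs.length).foldl
            (fun d' i => if zs.getD i ' ' ≠ ws.getD i ' ' then d' + 1 else d') 0 := by
        refine PySem.List.foldl_congr_mem _ _ _ _ ?_
        intro acc i hi
        have hi1 : i < zs.length := List.mem_range.mp hi
        have hi2 : i < ws.length := hlen ▸ hi1
        rw [List.getD_append _ _ _ _ hi1, List.getD_append _ _ _ _ hi2]
      rw [hcong, ih ws hlen]
      have g1 : (zs ++ [c]).getD zs.length ' ' = c := by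
        rw [List.getD_append_right _ _ _ _ (le_refl _), Nat.sub_self]; rfl
      have g2 : (ws ++ [d]).getD zs.length ' ' = d := by
        rw [hlen, List.getD_append_right _ _ _ _ (le_refl _), Nat.sub_self]; rfl
      simp only [List.foldl_cons, List.foldl_nil, g1, g2,
        List.reverse_append, List.reverse_cons, List.reverse_nil, List.nil_append,
        List.cons_append, cmpL]
      by_cases hcd : c = d
      · simp [hcd]
      · simp [hcd]; omega

theorem diff_eq (m n : Nat) :
    (List.range (padPair (pyBin m) (pyBin n)).1.length).foldl
      (fun d i => if (padPair (pyBin m) (pyBin n)).1.getD i ' '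
          ≠ (padPair (pyBin m) (pyBin n)).2.getD i ' ' then d + 1 else d) 0
    = popCount (m ^^^ n) := by
  unfold padPair
  split_ifs with hl
  · have h : (pyBin m).length
        = (List.replicate ((pyBin m).length - (pyBin n).length) '0' ++ pyBin n).length := by
      simp [List.length_append, List.length_replicate]; omega
    rw [loop_eq _ _ h, List.reverse_append, List.reverse_replicate, cmpL_pad_right, cmpL_pyBin]
  · have h : (List.replicate ((pyBin n).length - (pyBin m).length) '0' ++ pyBin m).length
        = (pyBin n).length := by
      simp [List.length_append, List.length_replicate]; omega
    rw [loop_eq _ _ h, List.reverse_append, List.reverse_replicate, cmpL_pad_left, cmpL_pyBin]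

theorem main_eq (a b : Int) : smuge_equal a b = smuge_equal_alt a b := by
  by_cases hab : a = b
  · subst hab
    simp [smuge_equal, smuge_equal_alt, Nat.xor_self, popCount_zero]
  · simp only [smuge_equal, smuge_equal_alt, if_neg hab]
    rw [diff_eq]

-- ===== VERDICT (by name: the statement is the Claim_ definition above) =====
theorem smuge_equal_spec : Claim_equal_smuge_equal := by
  intro a b _
  show smuge_equal a b = smuge_equal_alt a b
  exact main_eq a b
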